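-- pv_equiv track=rewrite | github.com/Luminarada80/scBONITA2 | scBONITA/keggParser.py | deconvolute_groups
-- ===== SOURCE A (Python) =====
-- def deconvolute_groups(node_id, groups):
--     """
--     Creates a list with each group containing the node
--
--     node_id: a node ID that may be a group
--     groups: store group IDs and list of sub-ids
--     return value: a list that contains all group IDs deconvoluted
--     """
--     node_list = []
--     if node_id in groups.keys():
--         # Deconvolute each of the groups that the node is in
--         for component_id in groups[node_id]:
--             node_list.extend(deconvolute_groups(component_id, groups))
--     else:
--         node_list.extend([node_id])
--     return node_list
-- ===== SOURCE B (Python) =====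
-- def deconvolute_groups(node_id, groups):
--     """Iterative re-implementation: explicit LIFO stack instead of recursion."""
--     stack = [node_id]
--     result = []
--     while stack:
--         node = stack.pop()
--         if node in groups:
--             # push children reversed so the leftmost child is popped first
--             stack.extend(reversed(groups[node]))
--         else:
--             result.append(node)
--     return result
-- ===== Notes on version B (the rewrite author's own statement) =====
-- stated objective: alternative
-- what changed: The recursion over group membership is replaced by an iterative traversal with an explicit LIFO stack (children pushed in reversed order to preserve the left-to-right leaf order), removing Python recursion and the per-call list extends.
import Mathlib
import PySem

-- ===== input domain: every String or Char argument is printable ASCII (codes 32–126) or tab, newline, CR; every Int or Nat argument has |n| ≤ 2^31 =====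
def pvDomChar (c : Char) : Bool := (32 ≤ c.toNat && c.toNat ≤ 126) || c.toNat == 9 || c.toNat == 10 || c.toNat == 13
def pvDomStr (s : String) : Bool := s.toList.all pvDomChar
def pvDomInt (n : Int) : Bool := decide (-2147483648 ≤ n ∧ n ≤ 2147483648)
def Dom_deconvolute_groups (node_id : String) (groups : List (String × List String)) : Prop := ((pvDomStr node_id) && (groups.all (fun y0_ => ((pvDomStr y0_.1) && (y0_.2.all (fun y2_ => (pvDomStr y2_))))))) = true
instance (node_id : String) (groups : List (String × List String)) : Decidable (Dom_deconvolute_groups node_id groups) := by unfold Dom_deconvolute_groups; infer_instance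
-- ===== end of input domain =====

-- B replaces A's recursion by an iterative explicit-stack traversal (objective: alternative decomposition, same cost).

-- shared dict primitive: Python's `node in groups` / `groups[node]` (first-match lookup on the association list)
def lookupGrp (groups : List (String × List String)) (n : String) : Option (List String) :=
  match groups with
  | [] => none
  | (k, v) :: t => if k = n then some v else lookupGrp t n

-- ===== PORT A =====
-- Literal port of A's recursion; the Nat fuel is only a totality guard (Python A
-- recurses without bound and raises RecursionError on cyclic data, which Pre_
-- excludes); under Pre_ the fuel groups.length + 1 is never exhausted (proved below).
mutual
  def goA (groups : List (String × List String)) : Nat → String → Option (List String)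
    | 0, _ => none
    | fuel + 1, node_id =>
      match lookupGrp groups node_id with
      | some comps => goAs groups fuel comps      -- for component_id in groups[node_id]: node_list.extend(...)
      | none => some [node_id]                    -- node_list.extend([node_id])
  termination_by fuel _ => (fuel, 0)
  def goAs (groups : List (String × List String)) : Nat → List String → Option (List String)
    | _, [] => some []
    | fuel, c :: cs => do
      let r ← goA groups fuel c
      let rest ← goAs groups fuel cs
      pure (r ++ rest)
  termination_by fuel cs => (fuel, cs.length + 1)
end

def deconvolute_groups (node_id : String) (groups : List (String × List String)) : List String :=
  (goA groups (groups.length + 1) node_id).getD []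

-- ===== PORT B =====
-- Literal port of Source B's while loop. The Lean stack has its TOP at the head (the
-- reverse of the Python list, whose top is its end), so Python's
-- `stack.extend(reversed(groups[node]))` is `comps ++ stack` here.
-- The Nat fuel bounds the number of group expansions and is only a totality guard
-- (Python B loops forever on cyclic data, which Pre_ excludes); under Pre_ it is
-- never exhausted (proved below).
def maxCh : List (String × List String) → Nat
  | [] => 0
  | p :: t => max p.2.length (maxCh t)

def goB (groups : List (String × List String)) : Nat → List String → List String → Option (List String)
  | _, [], res => some res
  | fuel, node :: stack, res =>
    match lookupGrp groups node with
    | some comps =>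
      match fuel with
      | 0 => none
      | f + 1 => goB groups f (comps ++ stack) res
    | none => goB groups fuel stack (res ++ [node])
termination_by fuel stack _ => (fuel, stack.length)
decreasing_by
  · exact Prod.Lex.left _ _ (Nat.lt_succ_self _)
  · exact Prod.Lex.right _ (by simp)

def deconvolute_groups_alt (node_id : String) (groups : List (String × List String)) : List String :=
  (goB groups ((maxCh groups + 1) ^ (groups.length + 1)) [node_id] []).getD []

-- ===== PRECONDITION & SPEC =====
-- one breadth-first expansion step of the group graph: all children (deduplicated)
def stepF (groups : List (String × List String)) (S : List String) : List String :=
  (S.flatMap (fun n => (lookupGrp groups n).getD [])).dedup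

def iterF (groups : List (String × List String)) : Nat → List String → List String
  | 0, S => S
  | f + 1, S => iterF groups f (stepF groups S)

-- Pre_ is a property of the input mapping alone (neither port's computation): the
-- breadth-first frontier of the group-membership graph started at node_id dies out
-- within groups.length + 1 steps — equivalently, no cycle of the mapping is
-- reachable from node_id.  This is EXACTLY the set of inputs on which Python A
-- returns: on a reachable cycle A recurses forever (RecursionError) and B's
-- while-loop never terminates, so nothing is excluded on which A returns a value.
def Pre_deconvolute_groups (node_id : String) (groups : List (String × List String)) : Prop :=
  iterF groups (groups.length + 1) [node_id] = []

instance (node_id : String) (groups : List (String × List String)) : Decidable (Pre_deconvolute_groups node_id groups) := by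
  unfold Pre_deconvolute_groups; infer_instance

def pvWitness_deconvolute_groups : String × (List (String × List String)) :=
  ("g1", [("g1", ["a", "g2"]), ("g2", ["b"])])

def Spec_deconvolute_groups (node_id : String) (groups : List (String × List String)) (out : List String) : Prop := out = deconvolute_groups_alt node_id groups
instance (node_id : String) (groups : List (String × List String)) (out : List String) : Decidable (Spec_deconvolute_groups node_id groups out) := by unfold Spec_deconvolute_groups; infer_instance

-- ===== CLAIM (what is proved, stated in full; the proofs are below) =====
def Claim_equal_deconvolute_groups : Prop := ∀ (node_id : String) (groups : List (String × List String)), Dom_deconvolute_groups node_id groups → Pre_deconvolute_groups node_id groups → Spec_deconvolute_groups node_id groups (deconvolute_groups node_id groups)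

-- ===== LEMMAS AND PROOFS =====

theorem mem_stepF (g : List (String × List String)) (S : List String) (x : String) :
    x ∈ stepF g S ↔ ∃ s ∈ S, x ∈ (lookupGrp g s).getD [] := by
  simp [stepF]

theorem mem_iterF (g : List (String × List String)) :
    ∀ f S x, x ∈ iterF g f S ↔ ∃ s ∈ S, x ∈ iterF g f [s] := by
  intro f
  induction f with
  | zero => intro S x; simp [iterF]
  | succ f ih =>
    intro S x
    show x ∈ iterF g f (stepF g S) ↔ ∃ s ∈ S, x ∈ iterF g f (stepF g [s])
    constructor
    · intro h
      obtain ⟨t, ht, hx⟩ := (ih (stepF g S) x).mp h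
      obtain ⟨s, hs, htc⟩ := (mem_stepF g S t).mp ht
      have hts : t ∈ stepF g [s] := (mem_stepF g [s] t).mpr ⟨s, by simp, htc⟩
      exact ⟨s, hs, (ih (stepF g [s]) x).mpr ⟨t, hts, hx⟩⟩
    · rintro ⟨s, hs, hx⟩
      obtain ⟨t, ht, hx'⟩ := (ih (stepF g [s]) x).mp hx
      obtain ⟨s', hs', htc⟩ := (mem_stepF g [s] t).mp ht
      simp at hs'
      rw [hs'] at htc
      exact (ih (stepF g S) x).mpr ⟨t, (mem_stepF g S t).mpr ⟨s, hs, htc⟩, hx'⟩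

-- A terminates within the fuel: a dead frontier at depth f makes goA total at fuel f
theorem goAs_total (g : List (String × List String)) (f : Nat) (cs : List String)
    (h : ∀ c ∈ cs, (goA g f c).isSome) : (goAs g f cs).isSome := by
  induction cs with
  | nil => rw [goAs]; simp
  | cons c t ih =>
    rw [goAs]
    obtain ⟨r, hr⟩ := Option.isSome_iff_exists.mp (h c (List.mem_cons_self ..))
    obtain ⟨rs, hrs⟩ := Option.isSome_iff_exists.mp (ih (fun d hd => h d (List.mem_cons_of_mem _ hd)))
    simp [hr, hrs]

theorem goA_total (g : List (String × List String)) :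
    ∀ f n, iterF g f [n] = [] → (goA g f n).isSome := by
  intro f
  induction f with
  | zero => intro n h; simp [iterF] at h
  | succ f ih =>
    intro n h
    rw [goA]
    cases hn : lookupGrp g n with
    | none => simp
    | some comps =>
      simp only []
      refine goAs_total g f comps ?_
      intro c hc
      refine ih c ?_
      have hcs : c ∈ stepF g [n] := (mem_stepF g [n] c).mpr ⟨n, by simp, by simp [hn, hc]⟩
      have hemp : iterF g f (stepF g [n]) = [] := h
      rw [List.eq_nil_iff_forall_not_mem]
      intro x hx
      have : x ∈ iterF g f (stepF g [n]) :=
        (mem_iterF g f (stepF g [n]) x).mpr ⟨c, hcs, hx⟩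
      rw [hemp] at this
      simp at this

-- B's loop ignores extra fuel
theorem goB_mono (g : List (String × List String)) :
    ∀ f s r v f', goB g f s r = some v → f ≤ f' → goB g f' s r = some v := by
  intro f
  induction f using Nat.strong_induction_on with
  | _ f ihf =>
    intro s
    induction s with
    | nil => intro r v f' h hle; rw [goB] at h ⊢; exact h
    | cons n t ihs =>
      intro r v f' h hle
      rw [goB] at h ⊢
      cases hn : lookupGrp g n with
      | some comps =>
        simp only [hn] at h ⊢
        cases f with
        | zero => simp at h
        | succ fu =>
          cases f' with
          | zero => omega
          | succ fu' =>
            simp only [] at h ⊢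
            exact ihf fu (by omega) (comps ++ t) r v fu' h (by omega)
      | none =>
        simp only [hn] at h ⊢
        exact ihs (r ++ [n]) v f' h hle

-- children lists are bounded by maxCh
theorem lookupGrp_len_le (g : List (String × List String)) (n : String) (comps : List String)
    (h : lookupGrp g n = some comps) : comps.length ≤ maxCh g := by
  induction g with
  | nil => simp [lookupGrp] at h
  | cons p t ih =>
    obtain ⟨k, w⟩ := p
    by_cases hk : k = n
    · simp [lookupGrp, hk] at h
      simp [maxCh, ← h]
    · simp [lookupGrp, hk] at h
      have := ih h
      simp [maxCh]; omega

-- composition over a list of siblings, given composition for each single node at fuel fA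
theorem compAs (g : List (String × List String)) (fA : Nat)
    (hA : ∀ n l, goA g fA n = some l → ∀ s r v f, goB g f s (r ++ l) = some v →
          goB g ((maxCh g + 1) ^ fA + f) (n :: s) r = some v) :
    ∀ cs L, goAs g fA cs = some L → ∀ s r v f, goB g f s (r ++ L) = some v →
      goB g (cs.length * (maxCh g + 1) ^ fA + f) (cs ++ s) r = some v := by
  intro cs
  induction cs with
  | nil =>
    intro L hL s r v f h
    rw [goAs] at hL
    simp only [Option.some.injEq] at hL
    subst hL
    simpa using h
  | cons c cs ih =>
    intro L hL s r v f h
    rw [goAs] at hL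
    cases hc : goA g fA c with
    | none => simp [hc] at hL
    | some rc =>
      cases hcs : goAs g fA cs with
      | none => simp [hc, hcs] at hL
      | some rest =>
        simp [hc, hcs] at hL
        subst hL
        have h1 : goB g (cs.length * (maxCh g + 1) ^ fA + f) (cs ++ s) (r ++ rc) = some v := by
          refine ih rest hcs s (r ++ rc) v f ?_
          rwa [← List.append_assoc] at h
        have h2 := hA c rc hc (cs ++ s) r v (cs.length * (maxCh g + 1) ^ fA + f) h1
        have harith : (c :: cs).length * (maxCh g + 1) ^ fA + f
            = (maxCh g + 1) ^ fA + (cs.length * (maxCh g + 1) ^ fA + f) := by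
          simp [List.length_cons]; ring
        rw [harith]
        simpa using h2

-- composition: B, run on n pushed over s with result prefix r, first appends A's value of n
theorem compA (g : List (String × List String)) :
    ∀ fA n l, goA g fA n = some l → ∀ s r v f, goB g f s (r ++ l) = some v →
      goB g ((maxCh g + 1) ^ fA + f) (n :: s) r = some v := by
  intro fA
  induction fA with
  | zero => intro n l h; rw [goA] at h; simp at h
  | succ fA ih =>
    intro n l hA s r v f h
    rw [goA] at hA
    cases hn : lookupGrp g n with
    | none =>
      simp only [hn, Option.some.injEq] at hA
      subst hA
      refine goB_mono g f (n :: s) r v _ ?_ (Nat.le_add_left _ _)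
      rw [goB]
      simp only [hn]
      exact h
    | some comps =>
      simp only [hn] at hA
      have hx : 1 ≤ (maxCh g + 1) ^ (fA + 1) := Nat.one_le_pow _ _ (by omega)
      have hfe : (maxCh g + 1) ^ (fA + 1) + f = ((maxCh g + 1) ^ (fA + 1) + f - 1) + 1 := by omega
      have hstep : goB g ((maxCh g + 1) ^ (fA + 1) + f) (n :: s) r
          = goB g ((maxCh g + 1) ^ (fA + 1) + f - 1) (comps ++ s) r := by
        rw [hfe, goB]
        simp only [hn]
        rfl
      rw [hstep]
      have hlist := compAs g fA ih comps l hA s r v f h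
      refine goB_mono g _ _ _ _ _ hlist ?_
      have hm : comps.length ≤ maxCh g := lookupGrp_len_le g n comps hn
      have h1 : comps.length * (maxCh g + 1) ^ fA ≤ maxCh g * (maxCh g + 1) ^ fA :=
        Nat.mul_le_mul_right _ hm
      have h2 : maxCh g * (maxCh g + 1) ^ fA + (maxCh g + 1) ^ fA = (maxCh g + 1) ^ (fA + 1) := by
        rw [pow_succ]; ring
      have h3 : 1 ≤ (maxCh g + 1) ^ fA := Nat.one_le_pow _ _ (by omega)
      generalize hq1 : comps.length * (maxCh g + 1) ^ fA = q1 at h1 ⊢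
      generalize hq2 : maxCh g * (maxCh g + 1) ^ fA = q2 at h1 h2
      generalize hq3 : (maxCh g + 1) ^ fA = q3 at h2 h3
      omega

-- ===== VERDICT (by name: the statement is the Claim_ definition above) =====
theorem deconvolute_groups_spec : Claim_equal_deconvolute_groups := by
  unfold Claim_equal_deconvolute_groups
  intro node_id g _ hp
  unfold Spec_deconvolute_groups deconvolute_groups deconvolute_groups_alt
  have h1 : (goA g (g.length + 1) node_id).isSome :=
    goA_total g (g.length + 1) node_id hp
  obtain ⟨l, hl⟩ := Option.isSome_iff_exists.mp h1
  have h0 : goB g 0 [] ([] ++ l) = some l := by rw [goB]; simp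
  have h2 := compA g (g.length + 1) node_id l hl [] [] l 0 h0
  rw [Nat.add_zero] at h2
  rw [hl, h2]
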